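-- pv_equiv track=rewrite | github.com/rexcoleman/LeetCode-Programming-Exercises-Repository | Course_3_LeetCode_Top150_Top75_PremiumAlgorighms/Course-3-Exercise-42-TrappingRainWater-TwoPointers.py | sumBracketsReverse
-- ===== SOURCE A (Python) =====
-- from typing import List
--
-- def sumBracketsReverse(height: List[int], left, right):
--     minHeightRight = height[right]
--     total = 0
--     rightBracket = 0
--     locationMinRight = right
--
--     while left < right:
--
--         if height[right] < minHeightRight:
--             rightBracket += minHeightRight - height[right]
--         else:
--             minHeightRight = height[right]
--             total += rightBracket
--             rightBracket = 0
--             locationMinRight = right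
--         right -= 1
--
--     if minHeightRight <= height[left]:
--         return total + rightBracket, left
--
--     else:
--         return total, locationMinRight
-- ===== SOURCE B (Python) =====
-- from typing import List
--
-- def sumBracketsReverse(height: List[int], left, right):
--     vals = [height[i] for i in range(left + 1, right + 1)]
--     if not vals:
--         top = height[right]
--         return (0, left) if top <= height[left] else (0, right)
--     suf = []                      # suffix running maxima, built back to front
--     for v in reversed(vals):
--         suf.append(v if not suf else max(v, suf[-1]))
--     suf.reverse()
--     deficits = [s - v for s, v in zip(suf, vals)]
--     m = max(vals)
--     j = vals.index(m)
--     if m <= height[left]: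
--         return sum(deficits), left
--     return sum(deficits[j + 1:]), left + 1 + j
-- ===== Notes on version B (the rewrite author's own statement) =====
-- stated objective: alternative
-- what changed: Replaces A's single right-to-left scan with one mutating accumulator state (running max, committed total, pending bracket, location) by a multi-pass decomposition: materialise the bracket values, build the suffix-maxima list, sum per-index deficits, and locate the leftmost maximum with max()/index(), summing either all deficits or those right of the maximum.
import Mathlib
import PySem

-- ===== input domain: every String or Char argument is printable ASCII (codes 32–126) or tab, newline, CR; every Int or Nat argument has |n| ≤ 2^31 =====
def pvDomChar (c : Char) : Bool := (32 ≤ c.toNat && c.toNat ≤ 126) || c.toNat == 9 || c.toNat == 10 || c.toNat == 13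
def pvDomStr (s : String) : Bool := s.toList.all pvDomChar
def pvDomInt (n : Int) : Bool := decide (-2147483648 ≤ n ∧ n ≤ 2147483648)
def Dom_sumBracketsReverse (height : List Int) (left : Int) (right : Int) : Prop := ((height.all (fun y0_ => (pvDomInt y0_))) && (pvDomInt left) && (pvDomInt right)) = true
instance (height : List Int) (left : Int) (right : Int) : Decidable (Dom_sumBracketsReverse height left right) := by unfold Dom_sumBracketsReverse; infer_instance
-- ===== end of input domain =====

-- B replaces A's one-pass accumulator scan by a multi-pass suffix-max decomposition (alternative, same O(n) cost).

-- ===== PORT A =====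
-- xs[i] with Python's negative indexing; the default is never reached under Pre_ (indices in range)
def pvGetD (height : List Int) (i : Int) : Int := (PySem.List.pyGet? height i).getD 0

-- the while-loop of A; state (minHeightRight, total, rightBracket, locationMinRight), fuel = number of iterations
def pvALoop (height : List Int) : Nat → Int → Int × Int × Int × Int → Int × Int × Int × Int
  | 0, _, st => st
  | k+1, right, st =>
    let h := pvGetD height right
    if h < st.1 then pvALoop height k (right - 1) (st.1, st.2.1, st.2.2.1 + (st.1 - h), st.2.2.2)
    else pvALoop height k (right - 1) (h, st.2.1 + st.2.2.1, 0, right)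

def sumBracketsReverse (height : List Int) (left : Int) (right : Int) : Int × Int :=
  let st := pvALoop height (right - left).toNat right (pvGetD height right, 0, 0, right)
  if st.1 ≤ pvGetD height left then (st.2.1 + st.2.2.1, left) else (st.2.1, st.2.2.2)

-- ===== PORT B =====
def sumBracketsReverse_alt (height : List Int) (left : Int) (right : Int) : Int × Int :=
  let vals := (PySem.List.pyRange (left + 1) (right + 1) 1).map (fun i => pvGetD height i)
  if vals = [] then
    let top := pvGetD height right
    if top ≤ pvGetD height left then (0, left) else (0, right)
  else
    -- Source B builds suf by appending back-to-front and reversing once; encoded as cons-accumulation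
    let suf := vals.reverse.foldl (fun acc v => (match acc with | [] => v | a :: _ => max v a) :: acc) []
    let deficits := List.zipWith (fun s v => s - v) suf vals
    let m := (PySem.List.max? vals (fun y => y)).getD 0
    let j := (PySem.List.index? vals m).getD 0
    if m ≤ pvGetD height left then (deficits.sum, left)
    else ((deficits.drop (j + 1)).sum, left + 1 + (j : Int))

-- ===== PRECONDITION & SPEC =====
-- exactly the inputs on which A raises no IndexError: both indices are valid Python indices
def Pre_sumBracketsReverse (height : List Int) (left : Int) (right : Int) : Prop :=
  PySem.Raise.InRange height.length left ∧ PySem.Raise.InRange height.length right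
instance (height : List Int) (left : Int) (right : Int) : Decidable (Pre_sumBracketsReverse height left right) := by unfold Pre_sumBracketsReverse; infer_instance
def pvWitness_sumBracketsReverse : List Int × Int × Int := ([3, 1, 2, 5, 2, 4], 0, 5)

def Spec_sumBracketsReverse (height : List Int) (left : Int) (right : Int) (out : Int × Int) : Prop := out = sumBracketsReverse_alt height left right
instance (height : List Int) (left : Int) (right : Int) (out : Int × Int) : Decidable (Spec_sumBracketsReverse height left right out) := by unfold Spec_sumBracketsReverse; infer_instance

-- ===== CLAIM (what is proved, stated in full; the proofs are below) =====
def Claim_equal_sumBracketsReverse : Prop := ∀ (height : List Int) (left : Int) (right : Int), Dom_sumBracketsReverse height left right → Pre_sumBracketsReverse height left right → Spec_sumBracketsReverse height left right (sumBracketsReverse height left right)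

-- ===== LEMMAS AND PROOFS =====

-- abstract step/run of A's loop, over (index, value) pairs; head of the list is processed LAST
def pvStep (p : Int × Int) (st : Int × Int × Int × Int) : Int × Int × Int × Int :=
  if p.2 < st.1 then (st.1, st.2.1, st.2.2.1 + (st.1 - p.2), st.2.2.2)
  else (p.2, st.2.1 + st.2.2.1, 0, p.1)

def pvRun : List (Int × Int) → (Int × Int × Int × Int) → Int × Int × Int × Int
  | [], st => st
  | p :: rest, st => pvStep p (pvRun rest st)

def pvLmax : List Int → Int
  | [] => 0
  | v :: t => t.foldl max v

def pvIdxMax : List Int → Nat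
  | [] => 0
  | v :: t => if t = [] then 0 else if pvLmax t ≤ v then 0 else pvIdxMax t + 1

def pvDefSum : List Int → Int
  | [] => 0
  | v :: t => (pvLmax (v :: t) - v) + pvDefSum t

def pvPreSum (l : List Int) : Int := ((l.take (pvIdxMax l)).map (fun v => pvLmax l - v)).sum

def pvSufList : List Int → List Int
  | [] => []
  | v :: t => pvLmax (v :: t) :: pvSufList t

lemma pvRun_append (l : List (Int × Int)) (p : Int × Int) (st : Int × Int × Int × Int) :
    pvRun (l ++ [p]) st = pvRun l (pvStep p st) := by
  induction l with
  | nil => rfl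
  | cons q t ih => simp [pvRun, ih]

lemma pv_foldl_max_init (t : List Int) : ∀ a b : Int, t.foldl max (max a b) = max a (t.foldl max b) := by
  induction t with
  | nil => intro a b; rfl
  | cons c t ih =>
    intro a b
    simp only [List.foldl_cons]
    rw [max_assoc, ih]

lemma pvLmax_cons (v : Int) (t : List Int) (h : t ≠ []) : pvLmax (v :: t) = max v (pvLmax t) := by
  cases t with
  | nil => exact absurd rfl h
  | cons w t' => simp [pvLmax, pv_foldl_max_init]

lemma pvALoop_eq (height : List Int) : ∀ (k : Nat) (r : Int) (st : Int × Int × Int × Int),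
    pvALoop height k r st =
      pvRun ((PySem.List.pyRange (r - k + 1) (r + 1) 1).map (fun i => (i, pvGetD height i))) st := by
  intro k
  induction k with
  | zero =>
    intro r st
    rw [PySem.List.pyRange_one_eq_nil (by omega)]
    rfl
  | succ k ih =>
    intro r st
    have hstepped : pvALoop height (k+1) r st
        = pvALoop height k (r-1) (pvStep (r, pvGetD height r) st) := by
      simp only [pvALoop, pvStep]
      split <;> rfl
    rw [hstepped, ih (r-1) (pvStep (r, pvGetD height r) st)]
    have hsplit : PySem.List.pyRange (r - ((k+1 : Nat) : Int) + 1) (r + 1) 1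
        = PySem.List.pyRange (r - 1 - ((k : Nat) : Int) + 1) (r - 1 + 1) 1 ++ [r] := by
      have e1 : r - 1 + 1 = r := by ring
      have e2 : r - ((k+1 : Nat) : Int) + 1 = r - 1 - ((k : Nat) : Int) + 1 := by push_cast; ring
      rw [e1, e2, PySem.List.pyRange_one_succ_right (by omega)]
    have e1 : r - 1 + 1 = r := by ring
    rw [hsplit, List.map_append, List.map_cons, List.map_nil, pvRun_append, e1]

lemma pvIdxMax_lt_length (l : List Int) (h : l ≠ []) : pvIdxMax l < l.length := by
  induction l with
  | nil => exact absurd rfl h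
  | cons v t ih =>
    by_cases ht : t = []
    · subst ht; simp [pvIdxMax]
    · simp only [pvIdxMax, if_neg ht, List.length_cons]
      split
      · omega
      · have := ih ht; omega

lemma pvIndex?_lmax (l : List Int) (h : l ≠ []) :
    PySem.List.index? l (pvLmax l) = some (pvIdxMax l) := by
  induction l with
  | nil => exact absurd rfl h
  | cons v t ih =>
    by_cases ht : t = []
    · subst ht
      have : pvLmax [v] = v := rfl
      rw [this, pvIdxMax]
      simp [PySem.List.index?_cons_self]
    · rw [pvLmax_cons v t ht]
      by_cases hle : pvLmax t ≤ v
      · have hmax : max v (pvLmax t) = v := max_eq_left hle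
        have hidx : pvIdxMax (v :: t) = 0 := by simp [pvIdxMax, ht, hle]
        rw [hmax, hidx]
        exact PySem.List.index?_cons_self v t
      · have hmax : max v (pvLmax t) = pvLmax t := max_eq_right (le_of_lt (by omega))
        have hidx : pvIdxMax (v :: t) = pvIdxMax t + 1 := by simp [pvIdxMax, ht, hle]
        rw [hmax, hidx, PySem.List.index?_cons_of_ne t (by omega), ih ht]
        rfl

lemma pvDefSum_split (l : List Int) (h : l ≠ []) :
    pvDefSum l = pvDefSum (l.drop (pvIdxMax l + 1)) + pvPreSum l := by
  induction l with
  | nil => exact absurd rfl h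
  | cons v t ih =>
    by_cases ht : t = []
    · subst ht; simp [pvDefSum, pvPreSum, pvIdxMax, pvLmax]
    · rw [pvDefSum]
      by_cases hle : pvLmax t ≤ v
      · have hm : pvLmax (v :: t) = v := by rw [pvLmax_cons v t ht]; exact max_eq_left hle
        simp [pvIdxMax, ht, hle, pvPreSum, hm]
      · have hm : pvLmax (v :: t) = pvLmax t := by
          rw [pvLmax_cons v t ht]; exact max_eq_right (le_of_lt (by omega))
        have hidx : pvIdxMax (v :: t) = pvIdxMax t + 1 := by simp [pvIdxMax, ht, hle]
        rw [hm, ih ht, hidx]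
        simp only [List.drop_succ_cons, pvPreSum, List.take_succ_cons, List.map_cons, List.sum_cons, hidx, hm]
        ring

lemma pvRun_char : ∀ (p : List (Int × Int)) (v0 loc0 : Int),
    (p.map Prod.snd).getLast? = some v0 →
    pvRun p (v0, 0, 0, loc0) =
      (pvLmax (p.map Prod.snd),
       pvDefSum ((p.map Prod.snd).drop (pvIdxMax (p.map Prod.snd) + 1)),
       pvPreSum (p.map Prod.snd),
       (p[pvIdxMax (p.map Prod.snd)]?.getD (0, 0)).1) := by
  intro p
  induction p with
  | nil => intro v0 loc0 h; simp at h
  | cons q rest ih =>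
    obtain ⟨i, v⟩ := q
    intro v0 loc0 h
    by_cases hr : rest = []
    · subst hr
      simp only [List.map_cons, List.map_nil, List.getLast?_singleton, Option.some_inj] at h
      subst h
      simp [pvRun, pvStep, pvLmax, pvIdxMax, pvPreSum, pvDefSum]
    · have hmr : rest.map Prod.snd ≠ [] := by simpa using hr
      have hlast : (rest.map Prod.snd).getLast? = some v0 := by
        rw [List.map_cons] at h
        have hc : (v :: rest.map Prod.snd).getLast? = (rest.map Prod.snd).getLast? := by
          have := List.getLast?_append_of_ne_nil (l₁ := [v]) hmr
          simpa using this
        rwa [hc] at h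
      have hrun : pvRun ((i, v) :: rest) (v0, 0, 0, loc0) = pvStep (i, v) (pvRun rest (v0, 0, 0, loc0)) := rfl
      rw [hrun, ih v0 loc0 hlast]
      simp only [List.map_cons]
      by_cases hlt : v < pvLmax (rest.map Prod.snd)
      · have hstep : pvStep (i, v) (pvLmax (rest.map Prod.snd),
            pvDefSum ((rest.map Prod.snd).drop (pvIdxMax (rest.map Prod.snd) + 1)),
            pvPreSum (rest.map Prod.snd), (rest[pvIdxMax (rest.map Prod.snd)]?.getD (0,0)).1)
            = (pvLmax (rest.map Prod.snd),
               pvDefSum ((rest.map Prod.snd).drop (pvIdxMax (rest.map Prod.snd) + 1)),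
               pvPreSum (rest.map Prod.snd) + (pvLmax (rest.map Prod.snd) - v),
               (rest[pvIdxMax (rest.map Prod.snd)]?.getD (0,0)).1) := by
          simp [pvStep, hlt]
        rw [hstep]
        have hm : pvLmax (v :: rest.map Prod.snd) = pvLmax (rest.map Prod.snd) := by
          rw [pvLmax_cons _ _ hmr]
          exact max_eq_right (le_of_lt hlt)
        have hidx : pvIdxMax (v :: rest.map Prod.snd) = pvIdxMax (rest.map Prod.snd) + 1 := by
          simp [pvIdxMax, hmr, not_le.mpr hlt]
        rw [hm, hidx]
        refine Prod.ext rfl (Prod.ext ?_ (Prod.ext ?_ ?_))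
        · show pvDefSum _ = pvDefSum _
          rw [List.drop_succ_cons]
        · show pvPreSum _ + _ = pvPreSum _
          simp only [pvPreSum, hidx, hm, List.take_succ_cons, List.map_cons, List.sum_cons]
          ring
        · show _ = ((((i, v) :: rest))[pvIdxMax (rest.map Prod.snd) + 1]?.getD (0,0)).1
          simp
      · have hstep : pvStep (i, v) (pvLmax (rest.map Prod.snd),
            pvDefSum ((rest.map Prod.snd).drop (pvIdxMax (rest.map Prod.snd) + 1)),
            pvPreSum (rest.map Prod.snd), (rest[pvIdxMax (rest.map Prod.snd)]?.getD (0,0)).1)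
            = (v, pvDefSum ((rest.map Prod.snd).drop (pvIdxMax (rest.map Prod.snd) + 1))
                   + pvPreSum (rest.map Prod.snd), 0, i) := by
          simp [pvStep, hlt]
        rw [hstep]
        have hm : pvLmax (v :: rest.map Prod.snd) = v := by
          rw [pvLmax_cons _ _ hmr]
          exact max_eq_left (by omega)
        have hidx : pvIdxMax (v :: rest.map Prod.snd) = 0 := by
          simp only [pvIdxMax, if_neg hmr]
          rw [if_pos (by omega)]
        rw [hm, hidx]
        refine Prod.ext rfl (Prod.ext ?_ (Prod.ext ?_ ?_))
        · show pvDefSum _ + pvPreSum _ = pvDefSum _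
          rw [List.drop_succ_cons, List.drop_zero, ← pvDefSum_split _ hmr]
        · show (0 : Int) = pvPreSum _
          simp [pvPreSum, hidx]
        · show i = ((((i, v) :: rest))[(0 : Nat)]?.getD (0,0)).1
          simp

lemma pvSufList_eq_foldl (l : List Int) :
    l.reverse.foldl (fun acc v => (match acc with | [] => v | a :: _ => max v a) :: acc) [] = pvSufList l := by
  induction l with
  | nil => rfl
  | cons v t ih =>
    rw [List.reverse_cons, List.foldl_append, ih]
    cases ht : pvSufList t with
    | nil =>
      have : t = [] := by cases t with | nil => rfl | cons a b => simp [pvSufList] at ht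
      subst this
      rfl
    | cons a rest =>
      have hne : t ≠ [] := by intro hh; subst hh; simp [pvSufList] at ht
      have ha : a = pvLmax t := by
        cases t with
        | nil => exact absurd rfl hne
        | cons w t' => simp [pvSufList] at ht; exact ht.1.symm
      simp only [List.foldl_cons, List.foldl_nil]
      rw [pvSufList, pvLmax_cons v t hne, ← ht, ha]

lemma pvZip_defSum (l : List Int) :
    (List.zipWith (fun s v => s - v) (pvSufList l) l).sum = pvDefSum l := by
  induction l with
  | nil => rfl
  | cons v t ih => simp [pvSufList, pvDefSum, ih]

lemma pvSufList_drop (k : Nat) : ∀ (l : List Int), pvSufList (l.drop k) = (pvSufList l).drop k := by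
  induction k with
  | zero => intro l; simp
  | succ k ih =>
    intro l
    cases l with
    | nil => simp [pvSufList]
    | cons v t => simp only [List.drop_succ_cons, pvSufList]; exact ih t

lemma pvZip_drop (k : Nat) (l : List Int) :
    (List.zipWith (fun s v => s - v) (pvSufList l) l).drop k
      = List.zipWith (fun s v => s - v) (pvSufList (l.drop k)) (l.drop k) := by
  rw [pvSufList_drop, List.drop_zipWith]

-- ===== VERDICT (by name: the statement is the Claim_ definition above) =====
theorem sumBracketsReverse_spec : Claim_equal_sumBracketsReverse := by
  intro height left right _ _
  unfold Spec_sumBracketsReverse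
  by_cases hlr : left < right
  case neg =>
    have h0 : (right - left).toNat = 0 := by omega
    have hnil : PySem.List.pyRange (left + 1) (right + 1) 1 = [] :=
      PySem.List.pyRange_one_eq_nil (by omega)
    simp [sumBracketsReverse, sumBracketsReverse_alt, h0, hnil, pvALoop]
  case pos =>
    have hrange : right - ((right - left).toNat : Int) + 1 = left + 1 := by omega
    have hloop := pvALoop_eq height (right - left).toNat right (pvGetD height right, 0, 0, right)
    rw [hrange] at hloop
    have hvals : (List.map (fun i => (i, pvGetD height i)) (PySem.List.pyRange (left + 1) (right + 1) 1)).map Prod.snd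
        = List.map (fun i => pvGetD height i) (PySem.List.pyRange (left + 1) (right + 1) 1) := by
      rw [List.map_map]; rfl
    have hsplitr : PySem.List.pyRange (left + 1) (right + 1) 1
        = PySem.List.pyRange (left + 1) right 1 ++ [right] :=
      PySem.List.pyRange_one_succ_right (by omega)
    have hvne : List.map (fun i => pvGetD height i) (PySem.List.pyRange (left + 1) (right + 1) 1) ≠ [] := by
      rw [hsplitr]; simp
    have hlast : ((List.map (fun i => (i, pvGetD height i)) (PySem.List.pyRange (left + 1) (right + 1) 1)).map Prod.snd).getLast?
        = some (pvGetD height right) := by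
      rw [hvals, hsplitr, List.map_append]
      simp
    have hchar := pvRun_char _ (pvGetD height right) right hlast
    rw [hvals] at hchar
    rw [hchar] at hloop
    have hidxlt : pvIdxMax (List.map (fun i => pvGetD height i) (PySem.List.pyRange (left + 1) (right + 1) 1))
        < (List.map (fun i => pvGetD height i) (PySem.List.pyRange (left + 1) (right + 1) 1)).length :=
      pvIdxMax_lt_length _ hvne
    have hploc : ((List.map (fun i => (i, pvGetD height i)) (PySem.List.pyRange (left + 1) (right + 1) 1))[
          pvIdxMax (List.map (fun i => pvGetD height i) (PySem.List.pyRange (left + 1) (right + 1) 1))]?.getD (0, 0)).1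
        = left + 1 + (pvIdxMax (List.map (fun i => pvGetD height i) (PySem.List.pyRange (left + 1) (right + 1) 1)) : Int) := by
      have hlt : pvIdxMax (List.map (fun i => pvGetD height i) (PySem.List.pyRange (left + 1) (right + 1) 1))
          < (PySem.List.pyRange (left + 1) (right + 1) 1).length := by
        rw [List.length_map] at hidxlt; exact hidxlt
      rw [List.getElem?_map, List.getElem?_eq_getElem hlt]
      simp [PySem.List.getElem_pyRange_one]
    have hmax : (PySem.List.max? (List.map (fun i => pvGetD height i) (PySem.List.pyRange (left + 1) (right + 1) 1)) (fun y => y)).getD 0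
        = pvLmax (List.map (fun i => pvGetD height i) (PySem.List.pyRange (left + 1) (right + 1) 1)) := by
      cases hvv : List.map (fun i => pvGetD height i) (PySem.List.pyRange (left + 1) (right + 1) 1) with
      | nil => exact absurd hvv hvne
      | cons v t => rw [PySem.List.max?_id_cons]; rfl
    have hjdx : (PySem.List.index? (List.map (fun i => pvGetD height i) (PySem.List.pyRange (left + 1) (right + 1) 1))
          (pvLmax (List.map (fun i => pvGetD height i) (PySem.List.pyRange (left + 1) (right + 1) 1)))).getD 0
        = pvIdxMax (List.map (fun i => pvGetD height i) (PySem.List.pyRange (left + 1) (right + 1) 1)) := by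
      rw [pvIndex?_lmax _ hvne]; rfl
    simp only [sumBracketsReverse, sumBracketsReverse_alt, hloop, if_neg hvne, hmax, hjdx,
      pvSufList_eq_foldl, hploc]
    by_cases hcond : pvLmax (List.map (fun i => pvGetD height i) (PySem.List.pyRange (left + 1) (right + 1) 1)) ≤ pvGetD height left
    · simp only [if_pos hcond, pvZip_defSum]
      rw [pvDefSum_split _ hvne]
    · simp only [if_neg hcond]
      rw [pvZip_drop, pvZip_defSum]
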